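-- pv_equiv track=rewrite | github.com/CarlosAlvaroBenito/PreworkPython-Carlos-Alvaro | ejercicio6.py | es_palindroma
-- ===== SOURCE A (Python) =====
-- def es_palindroma(texto):
--     palabras = texto.split()
--     palindromos = []
--
--     for palabra in palabras:
--         palabra = palabra.lower()
--         if palabra == palabra[::-1]:
--             palindromos.append(palabra)
--
--     return palindromos
-- ===== SOURCE B (Python) =====
-- def _es_pal(w):
--     # two-pointer palindrome check
--     i, j = 0, len(w) - 1
--     while i < j:
--         if w[i] != w[j]:
--             return False
--         i += 1
--         j -= 1
--     return True
--
--
-- def es_palindroma(texto):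
--     lowered = [p.lower() for p in texto.split()]
--     return [w for w in lowered if _es_pal(w)]
-- ===== Notes on version B (the rewrite author's own statement) =====
-- stated objective: alternative
-- what changed: Replaces the slice-reversal comparison (building the reversed string and comparing whole strings) with an explicit two-pointer scan that compares characters inward and stops at the first mismatch, and replaces the accumulator loop with a lower-then-filter pipeline.
import Mathlib
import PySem

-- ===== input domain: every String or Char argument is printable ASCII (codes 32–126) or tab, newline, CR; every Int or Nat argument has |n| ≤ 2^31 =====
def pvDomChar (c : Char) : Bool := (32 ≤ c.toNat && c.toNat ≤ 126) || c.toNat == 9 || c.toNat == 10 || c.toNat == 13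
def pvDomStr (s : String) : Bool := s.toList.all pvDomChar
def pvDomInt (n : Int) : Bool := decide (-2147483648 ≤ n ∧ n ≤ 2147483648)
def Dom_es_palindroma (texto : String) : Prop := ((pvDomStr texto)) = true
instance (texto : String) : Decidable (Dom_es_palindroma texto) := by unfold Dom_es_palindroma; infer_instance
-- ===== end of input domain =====

-- B replaces the slice-reversal equality test with an explicit two-pointer character scan
-- and the append-accumulator loop with a lower-then-filter pipeline (alternative, same cost).


-- ===== PORT A =====
def es_palindroma (texto : String) : List String :=
  let palabras := PySem.Str.split₀ texto
  palabras.foldl (fun palindromos palabra =>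
    let p := PySem.Str.lower palabra
    if some p = PySem.Str.slice? p none none (-1) then palindromos ++ [p] else palindromos) []

-- ===== PORT B =====
-- two-pointer loop of _es_pal: while i < j, compare w[i] and w[j], move inward
def esPalLoop (w : List Char) (i j : Nat) : Bool :=
  if h : i < j then
    if w.getD i ' ' ≠ w.getD j ' ' then false
    else esPalLoop w (i + 1) (j - 1)
  else true
termination_by j - i
decreasing_by omega

def es_palindroma_alt (texto : String) : List String :=
  let lowered := (PySem.Str.split₀ texto).map PySem.Str.lower
  lowered.filter (fun w => esPalLoop w.toList 0 (w.toList.length - 1))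

-- ===== PRECONDITION & SPEC =====
def Spec_es_palindroma (texto : String) (out : List String) : Prop := out = es_palindroma_alt texto
instance (texto : String) (out : List String) : Decidable (Spec_es_palindroma texto out) := by unfold Spec_es_palindroma; infer_instance

-- ===== CLAIM (what is proved, stated in full; the proofs are below) =====
def Claim_equal_es_palindroma : Prop := ∀ (texto : String), Dom_es_palindroma texto → Spec_es_palindroma texto (es_palindroma texto)

-- ===== LEMMAS AND PROOFS =====

lemma esPalLoop_iff (w : List Char) (i j : Nat) :
    esPalLoop w i j = true ↔ ∀ k, i ≤ k → k ≤ j → w.getD k ' ' = w.getD (i + j - k) ' ' := by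
  induction i, j using esPalLoop.induct (w := w) with
  | case1 i j h hne =>
    rw [esPalLoop, dif_pos h, if_pos hne]
    simp only [Bool.false_eq_true, false_iff, not_forall]
    refine ⟨i, le_refl i, le_of_lt h, ?_⟩
    have : i + j - i = j := by omega
    rw [this]; exact hne
  | case2 i j h hne ih =>
    rw [esPalLoop, dif_pos h, if_neg hne]
    push_neg at hne
    constructor
    · intro hrec k hik hkj
      rcases eq_or_lt_of_le hik with heq | hik'
      · have e1 : i + j - k = j := by omega
        have e2 : k = i := heq.symm
        rw [e1, e2]; exact hne
      · rcases eq_or_lt_of_le hkj with heq | hkj'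
        · have e1 : i + j - k = i := by omega
          have e2 : k = j := heq
          rw [e1, e2]; exact hne.symm
        · have := (ih.mp hrec) k (by omega) (by omega)
          have e : i + 1 + (j - 1) - k = i + j - k := by omega
          rwa [e] at this
    · intro hall
      refine ih.mpr (fun k hik hkj => ?_)
      have := hall k (by omega) (by omega)
      have e : i + 1 + (j - 1) - k = i + j - k := by omega
      rwa [e]
  | case3 i j h =>
    rw [esPalLoop, dif_neg h]
    simp only [true_iff]
    intro k hik hkj
    have : i + j - k = k := by omega
    rw [this]

lemma esPalLoop_reverse (w : List Char) :
    esPalLoop w 0 (w.length - 1) = true ↔ w = w.reverse := by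
  rw [esPalLoop_iff]
  constructor
  · intro hall
    apply List.ext_getElem (by simp)
    intro k hk hk'
    have := hall k (Nat.zero_le k) (by omega)
    rw [List.getElem_reverse]
    have e : 0 + (w.length - 1) - k = w.length - 1 - k := by omega
    rw [e] at this
    rwa [List.getD_eq_getElem w ' ' hk, List.getD_eq_getElem w ' ' (by omega)] at this
  · intro hrev k h0k hk
    rcases Nat.eq_zero_or_pos w.length with hn | hn
    · have : w = [] := List.eq_nil_of_length_eq_zero hn
      subst this; simp
    · have hkl : k < w.length := by omega
      have e : 0 + (w.length - 1) - k = w.length - 1 - k := by omega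
      rw [e, List.getD_eq_getElem w ' ' hkl, List.getD_eq_getElem w ' ' (by omega)]
      have h1 : w[k]? = w.reverse[k]? := by rw [← hrev]
      rw [List.getElem?_reverse hkl, List.getElem?_eq_getElem hkl,
        List.getElem?_eq_getElem (show w.length - 1 - k < w.length by omega)] at h1
      exact Option.some.inj h1

lemma pointwise (p : String) :
    decide (some p = PySem.Str.slice? p none none (-1)) =
      esPalLoop p.toList 0 (p.toList.length - 1) := by
  rw [PySem.Str.slice?_none_none_neg_one]
  by_cases hp : p.toList = p.toList.reverse
  · have h1 : some p = some (String.ofList p.toList.reverse) := by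
      rw [← hp, String.ofList_toList]
    rw [h1, (esPalLoop_reverse p.toList).mpr hp]
    simp
  · have h1 : ¬ some p = some (String.ofList p.toList.reverse) := by
      intro h
      apply hp
      have := congrArg String.toList (Option.some.inj h)
      rwa [String.toList_ofList] at this
    have h2 : esPalLoop p.toList 0 (p.toList.length - 1) = false := by
      rcases Bool.eq_false_or_eq_true (esPalLoop p.toList 0 (p.toList.length - 1)) with h | h
      · exact absurd ((esPalLoop_reverse p.toList).mp h) hp
      · exact h
    rw [h2]
    simp [h1]

-- ===== VERDICT (by name: the statement is the Claim_ definition above) =====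
theorem es_palindroma_spec : Claim_equal_es_palindroma := by
  intro texto _
  unfold Spec_es_palindroma es_palindroma es_palindroma_alt
  rw [PySem.List.foldl_append_ite]
  rw [List.filter_map]
  simp only [List.filter_congr (fun x _ => pointwise (PySem.Str.lower x))]
  rfl
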